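-- pv_equiv track=rewrite | github.com/chimd715/AlgorithmStudy | Programmers/level2/remove_pair.py | recursion_solution
-- ===== SOURCE A (Python) =====
-- def recursion_solution(s):
--     # recursion depth limit (s length upto 1000000)
--     def _remove_repeated_char(s):
--         if len(s) < 2:
--             return s
--
--         previous = s[0]
--         for i, char in enumerate(s[1:]):
--             if previous == char:
--                 return _remove_repeated_char(s[:i] + s[i+2:])
--             previous = char
--
--         return s
--
--     return 0 if len(_remove_repeated_char(s)) else 1
-- ===== SOURCE B (Python) =====
-- def recursion_solution(s):
--     stack = []
--     for c in s:
--         if stack and stack[-1] == c: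
--             stack.pop()
--         else:
--             stack.append(c)
--     return 1 if not stack else 0
-- ===== Notes on version B (the rewrite author's own statement) =====
-- stated objective: faster
-- what changed: Replaced the recursive first-pair search-and-rebuild (each step scans and copies the string) with a single left-to-right pass over the string maintaining a stack that pops on a matching top; removal order does not affect emptiness.
import Mathlib
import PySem

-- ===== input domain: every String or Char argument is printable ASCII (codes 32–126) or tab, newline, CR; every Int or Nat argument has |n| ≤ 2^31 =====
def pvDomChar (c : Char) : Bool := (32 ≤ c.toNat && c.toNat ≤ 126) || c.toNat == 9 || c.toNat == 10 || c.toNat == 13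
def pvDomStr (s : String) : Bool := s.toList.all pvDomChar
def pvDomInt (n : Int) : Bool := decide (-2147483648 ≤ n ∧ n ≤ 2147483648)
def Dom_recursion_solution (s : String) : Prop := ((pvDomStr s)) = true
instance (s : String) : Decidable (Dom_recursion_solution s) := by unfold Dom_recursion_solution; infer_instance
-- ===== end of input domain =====

-- B replaces A's recursive first-pair search-and-rebuild with a single O(n) stack pass; equal return value, faster.

-- ===== PORT A =====
-- the 'for i, char in enumerate(s[1:])' loop with early return: returns the index i of the
-- first position with s[i] == s[i+1] (prev carries the previous character), none if no pair
def pvFindPair : Char → List Char → Option Nat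
  | _, [] => none
  | prev, c :: t => if prev = c then some 0 else (pvFindPair c t).map (· + 1)

theorem pvFindPair_le (rest : List Char) : ∀ (prev : Char) (i : Nat),
    pvFindPair prev rest = some i → i + 2 ≤ (prev :: rest).length := by
  induction rest with
  | nil => intro prev i h; simp [pvFindPair] at h
  | cons c t ih =>
    intro prev i h
    by_cases hpc : prev = c
    · simp [pvFindPair, hpc] at h; subst h; simp
    · simp [pvFindPair, hpc] at h
      obtain ⟨j, hj, rfl⟩ := h
      have := ih c j hj
      simp at this ⊢; omega

-- _remove_repeated_char: recurse on s[:i] + s[i+2:] for the first adjacent pair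
def pvRemoveRepeated (l : List Char) : List Char :=
  if l.length < 2 then l
  else
    match l with
    | [] => l
    | p :: rest =>
      match h : pvFindPair p rest with
      | some i => pvRemoveRepeated ((p :: rest).take i ++ (p :: rest).drop (i + 2))
      | none => l
termination_by l.length
decreasing_by
  have := pvFindPair_le rest p i h
  simp_all; omega

def recursion_solution (s : String) : Int :=
  if (pvRemoveRepeated s.toList).length ≠ 0 then 0 else 1

-- ===== PORT B =====
-- stack push: pop when the top matches, push otherwise (top of stack = head of list)
def pvPush (st : List Char) (c : Char) : List Char :=
  match st with
  | t :: ts => if t = c then ts else c :: t :: ts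
  | [] => [c]

def recursion_solution_alt (s : String) : Int :=
  if s.toList.foldl pvPush [] = [] then 1 else 0

-- ===== PRECONDITION & SPEC =====
def Spec_recursion_solution (s : String) (out : Int) : Prop := out = recursion_solution_alt s
instance (s : String) (out : Int) : Decidable (Spec_recursion_solution s out) := by unfold Spec_recursion_solution; infer_instance

-- ===== CLAIM (what is proved, stated in full; the proofs are below) =====
def Claim_equal_recursion_solution : Prop := ∀ (s : String), Dom_recursion_solution s → Spec_recursion_solution s (recursion_solution s)


-- ===== LEMMAS AND PROOFS =====

-- the stack never holds two equal adjacent characters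
theorem pvPush_inv (st : List Char) (c : Char) (h : List.IsChain (· ≠ ·) st) :
    List.IsChain (· ≠ ·) (pvPush st c) := by
  match st with
  | [] => simp [pvPush]
  | t :: ts =>
    by_cases htc : t = c
    · simp only [pvPush, htc, if_pos rfl]
      exact List.isChain_of_isChain_cons h
    · simp only [pvPush, if_neg htc, List.isChain_cons_cons]
      exact ⟨fun h' => htc h'.symm, h⟩

theorem pvPush_push (st : List Char) (c : Char) (h : List.IsChain (· ≠ ·) st) :
    pvPush (pvPush st c) c = st := by
  match st with
  | [] => simp [pvPush]
  | t :: ts =>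
    by_cases htc : t = c
    · subst htc
      match ts with
      | [] => simp [pvPush]
      | e :: u =>
        have hne : t ≠ e := (List.isChain_cons_cons.mp h).1
        have het : ¬ e = t := fun h' => hne h'.symm
        simp [pvPush, het]
    · simp [pvPush, htc]

-- removing one adjacent pair anywhere does not change the final stack
theorem pvFoldl_pair (a : List Char) : ∀ (st : List Char) (c : Char) (b : List Char),
    List.IsChain (· ≠ ·) st →
    (a ++ c :: c :: b).foldl pvPush st = (a ++ b).foldl pvPush st := by
  induction a with
  | nil =>
    intro st c b h
    simp [List.foldl, pvPush_push st c h]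
  | cons d a' ih =>
    intro st c b h
    simp only [List.cons_append, List.foldl_cons]
    exact ih (pvPush st d) c b (pvPush_inv st d h)

-- if l has no adjacent equal pair (and its head differs from the stack top),
-- the fold just reverses l onto the stack
theorem pvFoldl_nopair (l : List Char) : ∀ (st : List Char),
    List.IsChain (· ≠ ·) l →
    (∀ c, l.head? = some c → st.head? ≠ some c) →
    l.foldl pvPush st = l.reverse ++ st := by
  induction l with
  | nil => intro st _ _; simp
  | cons c t ih =>
    intro st hch hhd
    have hpush : pvPush st c = c :: st := by
      match st with
      | [] => simp [pvPush]
      | d :: ds =>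
        have : d ≠ c := by
          intro hdc; exact (hhd c rfl) (by simp [hdc])
        simp [pvPush, this]
    simp only [List.foldl_cons, hpush]
    rw [ih (c :: st) (List.isChain_of_isChain_cons hch)]
    · simp
    · intro e he hse
      simp at hse
      match t, he with
      | e :: t', rfl =>
        exact (List.isChain_cons_cons.mp hch).1 hse

-- pvFindPair = none means no adjacent equal characters
theorem pvFindPair_none (rest : List Char) : ∀ (prev : Char),
    pvFindPair prev rest = none → List.IsChain (· ≠ ·) (prev :: rest) := by
  induction rest with
  | nil => intro prev _; exact List.IsChain.singleton _
  | cons c t ih =>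
    intro prev h
    by_cases hpc : prev = c
    · simp [pvFindPair, hpc] at h
    · simp [pvFindPair, hpc] at h
      exact List.isChain_cons_cons.mpr ⟨hpc, ih c h⟩

-- pvFindPair = some i gives the decomposition l = l.take i ++ c::c:: l.drop (i+2)
theorem pvFindPair_some (rest : List Char) : ∀ (prev : Char) (i : Nat),
    pvFindPair prev rest = some i →
    ∃ c, prev :: rest =
      (prev :: rest).take i ++ c :: c :: (prev :: rest).drop (i + 2) := by
  induction rest with
  | nil => intro prev i h; simp [pvFindPair] at h
  | cons c t ih =>
    intro prev i h
    by_cases hpc : prev = c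
    · simp [pvFindPair, hpc] at h
      subst h hpc
      exact ⟨prev, by simp⟩
    · simp [pvFindPair, hpc] at h
      obtain ⟨j, hj, rfl⟩ := h
      obtain ⟨d, hd⟩ := ih c j hj
      refine ⟨d, ?_⟩
      simpa [List.take_succ_cons, List.drop_succ_cons] using congrArg (prev :: ·) hd

-- the stack result equals the reverse of A's fully-reduced string
theorem pvRed_eq_removeRepeated_aux (n : Nat) : ∀ (l : List Char), l.length = n →
    l.foldl pvPush [] = (pvRemoveRepeated l).reverse := by
  induction n using Nat.strong_induction_on with
  | _ n ih =>
    intro l hl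
    rw [pvRemoveRepeated.eq_def]
    split
    · next hlen =>
      match l, hlen with
      | [], _ => simp
      | [c], _ => simp [pvPush]
    · next hlen =>
      split
      · simp
      · rename_i p rest
        split
        · rename_i i h
          obtain ⟨c, hdec⟩ := pvFindPair_some rest p i h
          have hlt : ((p :: rest).take i ++ (p :: rest).drop (i + 2)).length < n := by
            have h2 := pvFindPair_le rest p i h
            simp only [List.length_append, List.length_take, List.length_drop] at *
            omega
          have hstep : (p :: rest).foldl pvPush [] =
              ((p :: rest).take i ++ (p :: rest).drop (i + 2)).foldl pvPush [] := by
            conv_lhs => rw [hdec]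
            exact pvFoldl_pair _ [] c _ List.IsChain.nil
          rw [hstep]
          exact ih _ hlt _ rfl
        · rename_i h
          have hch := pvFindPair_none rest p h
          simpa using pvFoldl_nopair (p :: rest) [] hch (by simp)

theorem pvRed_eq_removeRepeated (l : List Char) :
    l.foldl pvPush [] = (pvRemoveRepeated l).reverse :=
  pvRed_eq_removeRepeated_aux l.length l rfl

-- ===== VERDICT (by name: the statement is the Claim_ definition above) =====
theorem recursion_solution_spec : Claim_equal_recursion_solution := by
  intro s _
  unfold Spec_recursion_solution recursion_solution recursion_solution_alt
  rw [pvRed_eq_removeRepeated]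
  rcases h : pvRemoveRepeated s.toList with _ | ⟨c, t⟩ <;> simp
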